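-- pv_equiv track=rewrite | github.com/jharris2268/osmquadtreepostgis | osmquadtreepostgis/__init__.py | make_tag_cols
-- ===== SOURCE A (Python) =====
-- def has_mem(ct,k):
--     for a,b,c,d in ct:
--         if k==a:
--             return True
--     return False
--
-- def make_tag_cols(coltags):
--     common = [("osm_id","bigint"),("tile","bigint"), ("quadtree","bigint")]
--
--     post = []
--     if has_mem(coltags,'*'):
--         #post.append(('other_tags','jsonb'))
--         post.append(('other_tags','hstore'))
--     elif has_mem(coltags, 'XXX'):
--         #post.append(('tags', 'jsonb'))
--         post.append(('tags', 'hstore'))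
--     if has_mem(coltags, 'layer'):
--         post.append(('layer','int'))
--     if has_mem(coltags,'minzoom'):
--         post.append(('minzoom','integer'))
--     point = common+[(a,"text" ) for a,b,c,d in coltags if b and not a in ("*","minzoom",'XXX','layer')]+post+[("way","geometry(Point,3857)")]
--     line = common+[(a,"text") for a,b,c,d in coltags if c and not a in ("*","minzoom",'XXX','layer')]+post+[('z_order','int'),('length','float'),("way","geometry(LineString,3857)")]
--     poly = common[:1]+[('part','int')]+common[1:]+[(a,"text") for a,b,c,d in coltags if d and not a in ("*","minzoom",'XXX','layer')]+post+[('z_order','int'),('way_area','float'),("way","geometry(Polygon,3857)")]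
--
--     return point,line,poly
-- ===== SOURCE B (Python) =====
-- def make_tag_cols(coltags):
--     has_star = has_xxx = has_layer = has_minzoom = False
--     point_cols, line_cols, poly_cols = [], [], []
--     for a, b, c, d in coltags:
--         if a == '*':
--             has_star = True
--         elif a == 'XXX':
--             has_xxx = True
--         elif a == 'layer':
--             has_layer = True
--         elif a == 'minzoom':
--             has_minzoom = True
--         else:
--             col = (a, "text")
--             if b:
--                 point_cols.append(col)
--             if c:
--                 line_cols.append(col)
--             if d:
--                 poly_cols.append(col)
--     post = []
--     if has_star:
--         post.append(('other_tags', 'hstore'))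
--     elif has_xxx:
--         post.append(('tags', 'hstore'))
--     if has_layer:
--         post.append(('layer', 'int'))
--     if has_minzoom:
--         post.append(('minzoom', 'integer'))
--     ids = [("osm_id", "bigint"), ("tile", "bigint"), ("quadtree", "bigint")]
--     point = ids + point_cols + post + [("way", "geometry(Point,3857)")]
--     line = ids + line_cols + post + [('z_order', 'int'), ('length', 'float'), ("way", "geometry(LineString,3857)")]
--     poly = ids[:1] + [('part', 'int')] + ids[1:] + poly_cols + post + [('z_order', 'int'), ('way_area', 'float'), ("way", "geometry(Polygon,3857)")]
--     return point, line, poly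
-- ===== Notes on version B (the rewrite author's own statement) =====
-- stated objective: alternative
-- what changed: B replaces A's four separate has_mem scans plus three filtering list comprehensions (seven traversals of coltags) with a single fused pass that sets the four flags and appends to the three column lists, then assembles the same output from the flags.
import Mathlib
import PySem

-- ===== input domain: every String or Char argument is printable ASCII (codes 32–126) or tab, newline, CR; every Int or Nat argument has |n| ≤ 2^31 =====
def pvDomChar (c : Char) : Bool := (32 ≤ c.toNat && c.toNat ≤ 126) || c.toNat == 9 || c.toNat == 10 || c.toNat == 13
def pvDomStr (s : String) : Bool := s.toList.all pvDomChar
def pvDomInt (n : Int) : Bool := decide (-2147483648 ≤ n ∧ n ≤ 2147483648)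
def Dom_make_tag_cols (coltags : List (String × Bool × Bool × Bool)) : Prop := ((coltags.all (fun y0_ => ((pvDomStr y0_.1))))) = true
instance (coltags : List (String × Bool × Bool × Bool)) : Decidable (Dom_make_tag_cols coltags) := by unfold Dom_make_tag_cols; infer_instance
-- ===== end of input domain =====

-- B replaces A's four has_mem scans and three filtering comprehensions by one fused pass
-- that sets the four flags and collects the three column lists (objective: alternative decomposition).

-- ===== PORT A =====
def has_mem (ct : List (String × Bool × Bool × Bool)) (k : String) : Bool :=
  match ct with
  | [] => false
  | (a, _, _, _) :: rest => if k == a then true else has_mem rest k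

def make_tag_cols (coltags : List (String × Bool × Bool × Bool)) :
    (List (String × String)) × (List (String × String)) × (List (String × String)) :=
  let common : List (String × String) := [("osm_id","bigint"),("tile","bigint"),("quadtree","bigint")]
  let post : List (String × String) := []
  let post := if has_mem coltags "*" then post ++ [("other_tags","hstore")]
              else if has_mem coltags "XXX" then post ++ [("tags","hstore")] else post
  let post := if has_mem coltags "layer" then post ++ [("layer","int")] else post
  let post := if has_mem coltags "minzoom" then post ++ [("minzoom","integer")] else post
  let keep : String → Bool := fun a => !(a == "*" || a == "minzoom" || a == "XXX" || a == "layer")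
  let point := common ++ ((coltags.filter (fun t => t.2.1 && keep t.1)).map (fun t => (t.1, "text")))
               ++ post ++ [("way","geometry(Point,3857)")]
  let line := common ++ ((coltags.filter (fun t => t.2.2.1 && keep t.1)).map (fun t => (t.1, "text")))
              ++ post ++ [("z_order","int"),("length","float"),("way","geometry(LineString,3857)")]
  let poly := common.take 1 ++ [("part","int")] ++ common.drop 1
              ++ ((coltags.filter (fun t => t.2.2.2 && keep t.1)).map (fun t => (t.1, "text")))
              ++ post ++ [("z_order","int"),("way_area","float"),("way","geometry(Polygon,3857)")]
  (point, line, poly)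

-- ===== PORT B =====
-- the single fused pass of Source B: four flags and three column lists in one traversal
def altLoop (ct : List (String × Bool × Bool × Bool))
    (st : Bool × Bool × Bool × Bool × List (String × String) × List (String × String) × List (String × String)) :
    Bool × Bool × Bool × Bool × List (String × String) × List (String × String) × List (String × String) :=
  match ct with
  | [] => st
  | (a, b, c, d) :: rest =>
    let (hs, hx, hl, hm, pc, lc, yc) := st
    if a == "*" then altLoop rest (true, hx, hl, hm, pc, lc, yc)
    else if a == "XXX" then altLoop rest (hs, true, hl, hm, pc, lc, yc)
    else if a == "layer" then altLoop rest (hs, hx, true, hm, pc, lc, yc)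
    else if a == "minzoom" then altLoop rest (hs, hx, hl, true, pc, lc, yc)
    else altLoop rest (hs, hx, hl, hm,
      pc ++ (if b then [(a, "text")] else []),
      lc ++ (if c then [(a, "text")] else []),
      yc ++ (if d then [(a, "text")] else []))

def make_tag_cols_alt (coltags : List (String × Bool × Bool × Bool)) :
    (List (String × String)) × (List (String × String)) × (List (String × String)) :=
  let (hs, hx, hl, hm, pc, lc, yc) := altLoop coltags (false, false, false, false, [], [], [])
  let post : List (String × String) := []
  let post := if hs then post ++ [("other_tags","hstore")]
              else if hx then post ++ [("tags","hstore")] else post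
  let post := if hl then post ++ [("layer","int")] else post
  let post := if hm then post ++ [("minzoom","integer")] else post
  let ids : List (String × String) := [("osm_id","bigint"),("tile","bigint"),("quadtree","bigint")]
  let point := ids ++ pc ++ post ++ [("way","geometry(Point,3857)")]
  let line := ids ++ lc ++ post ++ [("z_order","int"),("length","float"),("way","geometry(LineString,3857)")]
  let poly := ids.take 1 ++ [("part","int")] ++ ids.drop 1 ++ yc ++ post
              ++ [("z_order","int"),("way_area","float"),("way","geometry(Polygon,3857)")]
  (point, line, poly)

-- ===== PRECONDITION & SPEC =====
def Spec_make_tag_cols (coltags : List (String × Bool × Bool × Bool)) (out : (List (String × String)) × (List (String × String)) × (List (String × String))) : Prop := out = make_tag_cols_alt coltags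
instance (coltags : List (String × Bool × Bool × Bool)) (out : (List (String × String)) × (List (String × String)) × (List (String × String))) : Decidable (Spec_make_tag_cols coltags out) := by unfold Spec_make_tag_cols; infer_instance

-- ===== CLAIM (what is proved, stated in full; the proofs are below) =====
def Claim_equal_make_tag_cols : Prop := ∀ (coltags : List (String × Bool × Bool × Bool)), Dom_make_tag_cols coltags → Spec_make_tag_cols coltags (make_tag_cols coltags)

-- ===== LEMMAS AND PROOFS =====

theorem altLoop_spec (ct : List (String × Bool × Bool × Bool)) :
    ∀ hs hx hl hm pc lc yc,
    altLoop ct (hs, hx, hl, hm, pc, lc, yc) =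
      (hs || has_mem ct "*", hx || has_mem ct "XXX", hl || has_mem ct "layer", hm || has_mem ct "minzoom",
       pc ++ ((ct.filter (fun t => t.2.1 && !(t.1 == "*" || t.1 == "minzoom" || t.1 == "XXX" || t.1 == "layer"))).map (fun t => (t.1, "text"))),
       lc ++ ((ct.filter (fun t => t.2.2.1 && !(t.1 == "*" || t.1 == "minzoom" || t.1 == "XXX" || t.1 == "layer"))).map (fun t => (t.1, "text"))),
       yc ++ ((ct.filter (fun t => t.2.2.2 && !(t.1 == "*" || t.1 == "minzoom" || t.1 == "XXX" || t.1 == "layer"))).map (fun t => (t.1, "text")))) := by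
  induction ct with
  | nil => intro hs hx hl hm pc lc yc; simp [altLoop, has_mem]
  | cons hd tl ih =>
    obtain ⟨a, b, c, d⟩ := hd
    intro hs hx hl hm pc lc yc
    by_cases h1 : a = "*"
    · subst h1; simp [altLoop, has_mem, ih, List.filter]
    · by_cases h2 : a = "XXX"
      · subst h2; simp [altLoop, has_mem, ih, List.filter]
      · by_cases h3 : a = "layer"
        · subst h3; simp [altLoop, has_mem, ih, List.filter]
        · by_cases h4 : a = "minzoom"
          · subst h4; simp [altLoop, has_mem, ih, List.filter]
          · have e1 : (a == "*") = false := by simp [h1]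
            have e2 : (a == "XXX") = false := by simp [h2]
            have e3 : (a == "layer") = false := by simp [h3]
            have e4 : (a == "minzoom") = false := by simp [h4]
            have f1 : ("*" == a) = false := by simp [Ne.symm h1]
            have f2 : ("XXX" == a) = false := by simp [Ne.symm h2]
            have f3 : ("layer" == a) = false := by simp [Ne.symm h3]
            have f4 : ("minzoom" == a) = false := by simp [Ne.symm h4]
            simp only [altLoop, has_mem, e1, e2, e3, e4, f1, f2, f3, f4, ih,
              List.filter, Bool.not_false, Bool.or_false, Bool.and_true]
            cases b <;> cases c <;> cases d <;> simp

-- ===== VERDICT (by name: the statement is the Claim_ definition above) =====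
theorem make_tag_cols_spec : Claim_equal_make_tag_cols := by
  intro coltags _
  unfold Spec_make_tag_cols make_tag_cols make_tag_cols_alt
  simp only [altLoop_spec, Bool.false_or, List.nil_append]
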